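-- pv_equiv track=rewrite | github.com/pewx24k/GB_dz_python | урок 5 генераторы.py | gen_new_list
-- ===== SOURCE A (Python) =====
-- def gen_new_list(tutors, klasses):
--     i = 0
--     while i < len(tutors) and i < len(klasses):
--         yield tutors[i], klasses[i]
--         i += 1
--     while i < len(tutors):
--         yield tutors[i], None
--         i += 1
-- ===== SOURCE B (Python) =====
-- def gen_new_list(tutors, klasses):
--     # Structural recursion on the tutor list: the head tutor is paired with the
--     # optional head class, then recurse on both tails (no index, no separate
--     # padding phase).
--     if not tutors:
--         return
--     yield tutors[0], (klasses[0] if klasses else None)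
--     yield from gen_new_list(tutors[1:], klasses[1:])
-- ===== Notes on version B (the rewrite author's own statement) =====
-- stated objective: alternative
-- what changed: Replaces A's index counter and two separate while-loops (paired phase then None-padding phase) with a single structural recursion on the tutor list whose one uniform case pairs the head tutor with the optional head class and recurses on both tails.
import Mathlib
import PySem

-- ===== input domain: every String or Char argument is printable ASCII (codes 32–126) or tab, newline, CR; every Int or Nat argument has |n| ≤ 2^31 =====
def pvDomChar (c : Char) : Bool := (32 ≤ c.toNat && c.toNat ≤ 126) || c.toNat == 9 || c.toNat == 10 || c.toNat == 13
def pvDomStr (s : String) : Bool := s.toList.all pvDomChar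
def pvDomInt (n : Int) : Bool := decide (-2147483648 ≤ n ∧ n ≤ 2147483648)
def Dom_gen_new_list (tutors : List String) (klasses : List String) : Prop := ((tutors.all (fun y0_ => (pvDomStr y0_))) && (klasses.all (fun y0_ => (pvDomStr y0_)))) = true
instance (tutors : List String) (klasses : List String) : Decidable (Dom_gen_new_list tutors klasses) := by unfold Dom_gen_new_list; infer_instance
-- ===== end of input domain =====

-- B replaces A's index counter and two-phase while-loops with a single structural
-- recursion on the tutor list (alternative decomposition; same number of steps).

-- ===== PORT A =====
-- second while loop: while i < len(tutors): yield tutors[i], None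
def pvLoop2 (tutors : List String) (i : Nat) : List (String × Option String) :=
  if h : i < tutors.length then
    (tutors[i], none) :: pvLoop2 tutors (i + 1)
  else []
termination_by tutors.length - i

-- first while loop: while i < len(tutors) and i < len(klasses): yield tutors[i], klasses[i]
def pvLoop1 (tutors : List String) (klasses : List String) (i : Nat) : List (String × Option String) :=
  if h : i < tutors.length ∧ i < klasses.length then
    (tutors[i]'h.1, some (klasses[i]'h.2)) :: pvLoop1 tutors klasses (i + 1)
  else pvLoop2 tutors i
termination_by tutors.length - i

def gen_new_list (tutors : List String) (klasses : List String) : List (String × Option String) :=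
  pvLoop1 tutors klasses 0

-- ===== PORT B =====
-- structural recursion: head tutor paired with optional head class, recurse on tails
-- (klasses[0] if klasses else None → head?; tutors[1:], klasses[1:] → drop 1)
def gen_new_list_alt (tutors : List String) (klasses : List String) : List (String × Option String) :=
  match tutors with
  | [] => []
  | t :: ts => (t, klasses.head?) :: gen_new_list_alt ts (klasses.drop 1)

-- ===== PRECONDITION & SPEC =====
def Spec_gen_new_list (tutors : List String) (klasses : List String) (out : List (String × Option String)) : Prop := out = gen_new_list_alt tutors klasses
instance (tutors : List String) (klasses : List String) (out : List (String × Option String)) : Decidable (Spec_gen_new_list tutors klasses out) := by unfold Spec_gen_new_list; infer_instance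

-- ===== CLAIM =====
def Claim_equal_gen_new_list : Prop := ∀ (tutors : List String) (klasses : List String), Dom_gen_new_list tutors klasses → Spec_gen_new_list tutors klasses (gen_new_list tutors klasses)

-- ===== LEMMAS AND PROOFS =====

theorem alt_nil_right (t : List String) :
    gen_new_list_alt t [] = t.map (fun x => (x, none)) := by
  induction t with
  | nil => rfl
  | cons x xs ih => simp [gen_new_list_alt, ih]

theorem pvLoop2_eq (t : List String) (i : Nat) :
    pvLoop2 t i = (t.drop i).map (fun x => (x, none)) := by
  fun_induction pvLoop2 t i with
  | case1 i h ih =>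
      rw [ih, List.drop_eq_getElem_cons h]
      rfl
  | case2 i h =>
      rw [List.drop_eq_nil_of_le (by omega)]
      rfl

theorem alt_cons (x : String) (xs ks : List String) :
    gen_new_list_alt (x :: xs) ks = (x, ks.head?) :: gen_new_list_alt xs (ks.drop 1) := rfl

theorem pvLoop1_eq (t k : List String) (i : Nat) :
    pvLoop1 t k i = gen_new_list_alt (t.drop i) (k.drop i) := by
  fun_induction pvLoop1 t k i with
  | case1 i h ih =>
      rw [ih, List.drop_eq_getElem_cons h.1, List.drop_eq_getElem_cons h.2, alt_cons]
      simp [List.drop_drop]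
  | case2 i h =>
      rw [pvLoop2_eq]
      by_cases ht : i < t.length
      · have hk : k.length ≤ i := by omega
        rw [List.drop_eq_nil_of_le hk, alt_nil_right]
      · rw [List.drop_eq_nil_of_le (show t.length ≤ i by omega)]
        rfl

-- ===== VERDICT =====
theorem gen_new_list_spec : Claim_equal_gen_new_list := by
  intro t k _
  show gen_new_list t k = gen_new_list_alt t k
  rw [gen_new_list, pvLoop1_eq]
  simp
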